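-- pv_equiv track=rewrite | github.com/oo13/PyPoDict | podict/metadata.py | get_charset
-- ===== SOURCE A (Python) =====
-- _charset_delim = ' \t\n'
--
-- def get_charset(metadata_str):
--     '''Get the value for "charset" from the metadata.
--
--     Extract the value for "charset" in a way that is compatible with GNU gettext tools.
--
--     Return None or a string.
--
--     Note: This library supports only UTF-8.
--     '''
--     if not isinstance(metadata_str, str):
--         # Reject a common error where setting entries['']['msgstr'] to the parameter.
--         raise TypeError("The argument must be a string")
--     keyword = 'charset='
--     i = metadata_str.find(keyword)
--     if i < 0:
--         return None
--     i += len(keyword)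
--     value = ''
--     for c in metadata_str[i:]:
--         if c in _charset_delim:
--             break
--         else:
--             value += c
--     return value
-- ===== SOURCE B (Python) =====
-- _charset_delim = ' \t\n'
--
-- def get_charset(metadata_str):
--     '''Get the value for "charset" from the metadata.
--
--     Partition on the keyword, then cut the remainder at the earliest
--     delimiter position found, instead of accumulating characters one by one.
--     '''
--     if not isinstance(metadata_str, str):
--         raise TypeError("The argument must be a string")
--     _head, sep, tail = metadata_str.partition('charset=')
--     if not sep:
--         return None
--     end = len(tail)
--     for d in _charset_delim:
--         pos = tail.find(d)
--         if 0 <= pos < end: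
--             end = pos
--     return tail[:end]
-- ===== Notes on version B (the rewrite author's own statement) =====
-- stated objective: alternative
-- what changed: Replaces A's character-by-character accumulation loop after find() with str.partition on the keyword followed by one find() per delimiter to compute the earliest cut position and a single slice.
import Mathlib
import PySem

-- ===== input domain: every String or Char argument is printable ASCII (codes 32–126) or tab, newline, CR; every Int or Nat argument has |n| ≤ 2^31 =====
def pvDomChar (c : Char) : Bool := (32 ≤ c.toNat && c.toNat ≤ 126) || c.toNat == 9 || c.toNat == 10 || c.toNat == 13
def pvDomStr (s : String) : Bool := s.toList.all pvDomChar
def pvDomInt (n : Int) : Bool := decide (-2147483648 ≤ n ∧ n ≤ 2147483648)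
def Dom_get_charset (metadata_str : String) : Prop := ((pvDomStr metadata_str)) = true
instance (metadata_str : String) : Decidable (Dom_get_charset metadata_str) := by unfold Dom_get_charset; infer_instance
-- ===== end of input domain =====

-- B replaces A's character-by-character accumulation loop with partition + earliest-delimiter-find + slice (objective: alternative, same cost).
-- The TypeError branch of A (non-string argument) is outside the type convention (the argument is a String here).

-- ===== PORT A =====
-- A's `for c in metadata_str[i:]` loop with break, accumulating `value`
def pvALoop : List Char → List Char → List Char
  | [], value => value
  | c :: rest, value =>
    if c ∈ " \t\n".toList then value
    else pvALoop rest (value ++ [c])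

def get_charset (metadata_str : String) : Option String :=
  let keyword := "charset="
  let i := PySem.Str.find metadata_str keyword
  if i < 0 then none
  else
    let i := i + PySem.Str.len keyword
    some (String.ofList (pvALoop (PySem.Chars.slice metadata_str.toList (some i) none) []))

-- ===== PORT B =====
-- CPython str.partition, exact for a nonempty separator (ours is 'charset=')
def pvPartition (s sep : List Char) : List Char × List Char × List Char :=
  let i := PySem.Chars.find s sep
  if i < 0 then (s, [], [])
  else (s.take i.toNat, sep, s.drop (i.toNat + sep.length))

-- one iteration of B's `for d in _charset_delim` loop: keep the smaller cut position
def pvStep (tail : List Char) (e : Nat) (d : Char) : Nat :=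
  let pos := PySem.Chars.find tail [d]
  if 0 ≤ pos ∧ pos < (e : Int) then pos.toNat else e

def get_charset_alt (metadata_str : String) : Option String :=
  let p := pvPartition metadata_str.toList "charset=".toList
  let tail := p.2.2
  if p.2.1 = [] then none
  else some (String.ofList (tail.take ((" \t\n".toList).foldl (pvStep tail) tail.length)))

-- ===== PRECONDITION & SPEC =====
def Spec_get_charset (metadata_str : String) (out : Option String) : Prop := out = get_charset_alt metadata_str
instance (metadata_str : String) (out : Option String) : Decidable (Spec_get_charset metadata_str out) := by unfold Spec_get_charset; infer_instance

-- ===== CLAIM (what is proved, stated in full; the proofs are below) =====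
def Claim_equal_get_charset : Prop := ∀ (metadata_str : String), Dom_get_charset metadata_str → Spec_get_charset metadata_str (get_charset metadata_str)

-- ===== LEMMAS AND PROOFS =====

-- the delimiter test of A's loop and B's Bool predicate agree
def pvKeep (c : Char) : Bool := !(" \t\n".toList.contains c)

lemma pvKeep_eq (c : Char) : pvKeep c = (!(c == ' ' || c == '\t' || c == '\n')) := by
  simp only [pvKeep, List.contains, List.elem]
  cases h1 : c == ' ' <;> cases h2 : c == '\t' <;> cases h3 : c == '\n' <;>
    simp_all [beq_iff_eq, beq_eq_false_iff_ne]

lemma pvALoop_eq (l acc : List Char) : pvALoop l acc = acc ++ l.takeWhile pvKeep := by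
  induction l generalizing acc with
  | nil => simp [pvALoop]
  | cons c rest ih =>
    by_cases h : c = ' ' ∨ c = '\t' ∨ c = '\n'
    · have hmem : c ∈ " \t\n".toList := by rcases h with h | h | h <;> subst h <;> decide
      have hk : pvKeep c = false := by
        rw [pvKeep_eq]; rcases h with h | h | h <;> subst h <;> decide
      simp only [pvALoop, List.takeWhile_cons, hk]
      rw [if_pos hmem]
      simp
    · have hmem : c ∉ " \t\n".toList := by simpa using h
      have hk : pvKeep c = true := by
        push_neg at h
        rw [pvKeep_eq]
        simp [beq_eq_false_iff_ne, h.1, h.2.1, h.2.2]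
      simp only [pvALoop, List.takeWhile_cons, hk]
      rw [if_neg hmem, ih]
      simp

-- first cut position for a single delimiter d
def pvFirstIdx (l : List Char) (d : Char) : Nat := (l.takeWhile (fun c => !(c == d))).length

lemma pvFind_go_single (d : Char) (l : List Char) (k : Nat) :
    (PySem.Chars.find.go [d] l k = -1 ∧ pvFirstIdx l d = l.length) ∨
    (PySem.Chars.find.go [d] l k = ((k + pvFirstIdx l d : Nat) : Int) ∧ pvFirstIdx l d < l.length) := by
  induction l generalizing k with
  | nil => left; simp [PySem.Chars.find.go, pvFirstIdx]
  | cons c rest ih =>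
    by_cases h : d = c
    · right
      subst h
      constructor
      · simp [PySem.Chars.find.go, pvFirstIdx, List.takeWhile_cons]
      · simp [pvFirstIdx, List.takeWhile_cons]
    · have hpre : ([d].isPrefixOf (c :: rest)) = false := by
        simp [List.isPrefixOf]; exact h
      have hfi : pvFirstIdx (c :: rest) d = pvFirstIdx rest d + 1 := by
        have : (c == d) = false := by simp [beq_iff_eq]; exact fun hc => h hc.symm
        simp [pvFirstIdx, List.takeWhile_cons, this]
      have hgo : PySem.Chars.find.go [d] (c :: rest) k = PySem.Chars.find.go [d] rest (k + 1) := by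
        simp [PySem.Chars.find.go, hpre]
      rcases ih (k + 1) with ⟨h1, h2⟩ | ⟨h1, h2⟩
      · left; constructor
        · rw [hgo]; exact h1
        · simp [hfi, h2]
      · right; constructor
        · rw [hgo, h1, hfi]; push_cast; ring
        · simp [hfi]; omega
  termination_by l.length

lemma pvStep_min (l : List Char) (e : Nat) (d : Char) (he : e ≤ l.length) :
    pvStep l e d = min e (pvFirstIdx l d) := by
  rcases pvFind_go_single d l 0 with ⟨h1, h2⟩ | ⟨h1, h2⟩
  · have : PySem.Chars.find l [d] = -1 := h1
    simp [pvStep, this]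
    omega
  · have : PySem.Chars.find l [d] = ((pvFirstIdx l d : Nat) : Int) := by
      simpa using h1
    simp [pvStep, this]
    by_cases hlt : pvFirstIdx l d < e
    · rw [if_pos (by exact_mod_cast hlt)]
      simp; omega
    · rw [if_neg (by exact_mod_cast hlt)]
      omega

lemma pvFirstIdx_cons_ne (c d : Char) (h : (c == d) = false) (rest : List Char) :
    pvFirstIdx (c :: rest) d = pvFirstIdx rest d + 1 := by
  simp [pvFirstIdx, List.takeWhile_cons, h]

lemma pvFirstIdx_cons_self (d : Char) (rest : List Char) : pvFirstIdx (d :: rest) d = 0 := by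
  simp [pvFirstIdx, List.takeWhile_cons]

lemma pvTakeWhile_min (l : List Char) :
    (l.takeWhile pvKeep).length =
      min (min (min l.length (pvFirstIdx l ' ')) (pvFirstIdx l '\t')) (pvFirstIdx l '\n') := by
  induction l with
  | nil => simp [pvFirstIdx]
  | cons c rest ih =>
    by_cases hk : pvKeep c = true
    · have h := hk
      rw [pvKeep_eq] at h
      have hs : (c == ' ') = false := by revert h; cases c == ' ' <;> simp
      have ht : (c == '\t') = false := by revert h; cases c == '\t' <;> simp_all
      have hn : (c == '\n') = false := by revert h; cases c == '\n' <;> simp_all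
      rw [List.takeWhile_cons, if_pos hk, List.length_cons, List.length_cons,
        pvFirstIdx_cons_ne c ' ' hs, pvFirstIdx_cons_ne c '\t' ht, pvFirstIdx_cons_ne c '\n' hn, ih]
      omega
    · have hk' : pvKeep c = false := by revert hk; cases pvKeep c <;> simp
      have h := hk
      rw [pvKeep_eq] at h
      have hc : c = ' ' ∨ c = '\t' ∨ c = '\n' := by
        by_contra hcon
        push_neg at hcon
        obtain ⟨a1, a2, a3⟩ := hcon
        simp [a1, a2, a3] at h
      have hlhs : ((c :: rest).takeWhile pvKeep).length = 0 := by
        rw [List.takeWhile_cons, if_neg (by simp [hk'])]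
        rfl
      rw [hlhs]
      rcases hc with h | h | h <;>
        · subst h
          rw [pvFirstIdx_cons_self]
          omega

lemma pvTake_takeWhile (l : List Char) (p : Char → Bool) :
    l.take (l.takeWhile p).length = l.takeWhile p :=
  (List.prefix_iff_eq_take.mp (List.takeWhile_prefix p)).symm

-- ===== VERDICT (by name: the statement is the Claim_ definition above) =====
theorem get_charset_spec : Claim_equal_get_charset := by
  intro s _
  unfold Spec_get_charset get_charset get_charset_alt pvPartition
  dsimp only
  rw [PySem.Str.find_eq]
  by_cases hneg : PySem.Chars.find s.toList "charset=".toList < 0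
  · rw [if_pos hneg, if_pos hneg]
    simp
  · rw [if_neg hneg, if_neg hneg]
    have hi0 : 0 ≤ PySem.Chars.find s.toList "charset=".toList := by omega
    have hlen : PySem.Str.len "charset=" = 8 := by decide
    have hlen' : ("charset=".toList : List Char).length = 8 := by decide
    rw [if_neg (by decide : ¬("charset=".toList = ([] : List Char)))]
    set j := PySem.Chars.find s.toList "charset=".toList with hj
    have hslice : PySem.Chars.slice s.toList (some (j + 8)) none = s.toList.drop (j.toNat + 8) := by
      show PySem.List.slice s.toList (some (j + 8)) none = _
      rw [PySem.List.slice_from s.toList (by omega : (0:Int) ≤ j + 8)]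
      congr 1
      omega
    set tail := s.toList.drop (j.toNat + 8) with htail
    have hfold : (" \t\n".toList).foldl (pvStep tail) tail.length = (tail.takeWhile pvKeep).length := by
      have h1 : pvStep tail tail.length ' ' = min tail.length (pvFirstIdx tail ' ') :=
        pvStep_min tail tail.length ' ' (le_refl _)
      have h2 : pvStep tail (min tail.length (pvFirstIdx tail ' ')) '\t'
          = min (min tail.length (pvFirstIdx tail ' ')) (pvFirstIdx tail '\t') :=
        pvStep_min tail _ '\t' (by omega)
      have h3 : pvStep tail (min (min tail.length (pvFirstIdx tail ' ')) (pvFirstIdx tail '\t')) '\n'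
          = min (min (min tail.length (pvFirstIdx tail ' ')) (pvFirstIdx tail '\t')) (pvFirstIdx tail '\n') :=
        pvStep_min tail _ '\n' (by omega)
      show pvStep tail (pvStep tail (pvStep tail tail.length ' ') '\t') '\n' = _
      rw [h1, h2, h3, pvTakeWhile_min]
    rw [hlen, hslice, hlen', ← htail, hfold, pvALoop_eq, pvTake_takeWhile]
    simp
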